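-- pv_equiv track=rewrite | github.com/gFrincu/AdventOfCode | 2024/day4.py | search_word_in_diagonals
-- ===== SOURCE A (Python) =====
-- def search_word_in_diagonals(diagonals, word):
--     count = 0
--     # Loop through all the diagonals
--     for diagonal in diagonals:
--         # Convert the diagonal into a string
--         diagonal_str = ''.join(map(str, diagonal))
--         # Search the word from left to right
--         index = diagonal_str.find(word)
--         while index != -1:
--             count += 1
--             index = diagonal_str.find(word, index + 1)
--         # Search the word from right to left
--         reversed_word = word[::-1]
--         index = diagonal_str.find(reversed_word)
--         while index != -1:
--             count += 1
--             index = diagonal_str.find(reversed_word, index + 1)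
--
--     return count
-- ===== SOURCE B (Python) =====
-- def search_word_in_diagonals(diagonals, word):
--     reversed_word = word[::-1]
--     L = len(word)
--     count = 0
--     for diagonal in diagonals:
--         s = ''.join(diagonal)
--         # one sliding-window pass testing both patterns at each start
--         for i in range(len(s) - L + 1):
--             chunk = s[i:i + L]
--             if chunk == word:
--                 count += 1
--             if chunk == reversed_word:
--                 count += 1
--     return count
-- ===== Notes on version B (the rewrite author's own statement) =====
-- stated objective: simpler
-- what changed: Replaces the two str.find restart-while-loops per diagonal with one sliding-window pass that, at each start position, compares the window against the word and the precomputed reversed word.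
import Mathlib
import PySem

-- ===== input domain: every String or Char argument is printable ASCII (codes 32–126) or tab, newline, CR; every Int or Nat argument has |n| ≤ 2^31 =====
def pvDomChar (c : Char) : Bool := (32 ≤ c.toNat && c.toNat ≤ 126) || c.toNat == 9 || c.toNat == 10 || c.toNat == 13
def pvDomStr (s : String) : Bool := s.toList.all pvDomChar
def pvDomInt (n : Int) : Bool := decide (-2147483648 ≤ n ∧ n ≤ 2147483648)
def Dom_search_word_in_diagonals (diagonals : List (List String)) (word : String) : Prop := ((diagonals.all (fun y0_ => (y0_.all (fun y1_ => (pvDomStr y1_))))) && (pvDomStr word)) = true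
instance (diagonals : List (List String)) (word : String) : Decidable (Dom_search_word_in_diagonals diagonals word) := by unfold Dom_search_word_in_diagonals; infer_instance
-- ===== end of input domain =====

-- B replaces A's two str.find restart-while-loops per diagonal by one sliding-window
-- pass comparing each window against the word and the precomputed reversed word (simpler).

-- ===== PORT A =====

-- termination helper for the while-loop port: a start past len(s) finds nothing (CPython quirk, kept by PySem)
theorem pvFindFrom_past_len (s w : List Char) (k : Nat) (h : s.length < k) :
    PySem.Chars.findFrom s w (k : Int) none = -1 := by
  simp only [PySem.Chars.findFrom]
  split_ifs <;> first | rfl | omega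

-- termination helper: a non-(-1) find result lies in [start, len]
theorem pvFindFrom_ge (s w : List Char) (k : Nat)
    (h : PySem.Chars.findFrom s w (k : Int) none ≠ -1) :
    (k : Int) ≤ PySem.Chars.findFrom s w (k : Int) none ∧
      PySem.Chars.findFrom s w (k : Int) none ≤ s.length := by
  by_cases hk : k ≤ s.length
  · refine ⟨(PySem.Chars.findFrom_natCast_spec s w k hk h).1, ?_⟩
    rw [PySem.Chars.findFrom_natCast s w k hk] at h ⊢
    split_ifs with h0
    · omega
    · have := PySem.Chars.find_le_length (s.drop k) w
      simp only [List.length_drop] at this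
      omega
  · exact absurd (pvFindFrom_past_len s w k (by omega)) h

-- 'index = s.find(word, start); while index != -1: count += 1; index = s.find(word, index+1)'
def pvFindLoop (s w : List Char) (start : Nat) (count : Int) : Int :=
  let index := PySem.Chars.findFrom s w (start : Int) none
  if h : index = -1 then count
  else pvFindLoop s w (index.toNat + 1) (count + 1)
termination_by s.length + 1 - start
decreasing_by
  have := pvFindFrom_ge s w start h
  omega

def search_word_in_diagonals (diagonals : List (List String)) (word : String) : Int :=
  diagonals.foldl (fun count diagonal =>
    -- diagonal_str = ''.join(map(str, diagonal))  (str of a str is the string itself)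
    let diagonal_str := PySem.Chars.join [] (diagonal.map String.toList)
    -- first while loop: the word, left to right (the initial find is find(word, 0))
    let count := pvFindLoop diagonal_str word.toList 0 count
    -- reversed_word = word[::-1]  (slice? with step -1 never returns none)
    let reversed_word := (PySem.List.slice? word.toList none none (-1)).getD []
    -- second while loop: the reversed word
    pvFindLoop diagonal_str reversed_word 0 count) 0

-- ===== PORT B =====

def search_word_in_diagonals_alt (diagonals : List (List String)) (word : String) : Int :=
  -- reversed_word = word[::-1], computed once
  let reversed_word := (PySem.List.slice? word.toList none none (-1)).getD []
  let L := word.toList.length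
  diagonals.foldl (fun count diagonal =>
    let s := PySem.Chars.join [] (diagonal.map String.toList)
    -- for i in range(len(s) - L + 1): one window, two independent tests
    (PySem.List.pyRange 0 ((s.length : Int) - (L : Int) + 1)).foldl (fun c i =>
      let chunk := PySem.List.slice s (some i) (some (i + (L : Int)))
      let c := if chunk = word.toList then c + 1 else c
      if chunk = reversed_word then c + 1 else c) count) 0

-- ===== PRECONDITION & SPEC =====
def Spec_search_word_in_diagonals (diagonals : List (List String)) (word : String) (out : Int) : Prop := out = search_word_in_diagonals_alt diagonals word
instance (diagonals : List (List String)) (word : String) (out : Int) : Decidable (Spec_search_word_in_diagonals diagonals word out) := by unfold Spec_search_word_in_diagonals; infer_instance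

-- ===== CLAIM (what is proved, stated in full; the proofs are below) =====
def Claim_equal_search_word_in_diagonals : Prop := ∀ (diagonals : List (List String)) (word : String), Dom_search_word_in_diagonals diagonals word → Spec_search_word_in_diagonals diagonals word (search_word_in_diagonals diagonals word)

-- ===== LEMMAS AND PROOFS =====

-- number of start positions i ∈ [start, len] at which w occurs as a prefix of s.drop i
def pvOcc (s w : List Char) (start : Nat) : Nat :=
  List.countP (fun i => decide (w <+: List.drop i s)) (List.range' start (s.length + 1 - start))

theorem pvOcc_past (s w : List Char) (start : Nat) (h : s.length < start) : pvOcc s w start = 0 := by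
  unfold pvOcc
  have : s.length + 1 - start = 0 := by omega
  simp [this]

theorem pvPrefix_drop_infix (s w : List Char) {j i : Nat} (hji : j ≤ i)
    (h : w <+: List.drop i s) : w <:+: List.drop j s := by
  rw [List.infix_iff_prefix_suffix]
  refine ⟨List.drop (i - j) (List.drop j s), ?_, List.drop_suffix _ _⟩
  rw [List.drop_drop]
  have : j + (i - j) = i := by omega
  rw [this]
  exact h

-- the find-restart while loop counts exactly the occurrence positions ≥ start
theorem pvFindLoop_eq_occ (s w : List Char) : ∀ start count,
    pvFindLoop s w start count = count + (pvOcc s w start : Int) := by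
  have main : ∀ n start count, s.length + 1 - start ≤ n →
      pvFindLoop s w start count = count + (pvOcc s w start : Int) := by
    intro n
    induction n with
    | zero =>
      intro start count hn
      have hs : s.length < start := by omega
      rw [pvFindLoop]
      rw [pvFindFrom_past_len s w start hs]
      simp [pvOcc_past s w start hs]
    | succ n ih =>
      intro start count hn
      rw [pvFindLoop]
      by_cases h : PySem.Chars.findFrom s w (start : Int) none = -1
      · simp only [h, dite_true]
        by_cases hk : start ≤ s.length
        · have hno := (PySem.Chars.findFrom_natCast_eq_neg_one_iff s w start hk).1 h
          have : pvOcc s w start = 0 := by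
            apply List.countP_eq_zero.2
            intro i hi
            rw [List.mem_range'_1] at hi
            simp only [decide_eq_true_eq]
            intro hp
            exact hno (pvPrefix_drop_infix s w hi.1 hp)
          simp [this]
        · simp [pvOcc_past s w start (by omega)]
      · simp only [h, reduceDIte]
        have hk : start ≤ s.length := by
          by_contra hk
          exact h (pvFindFrom_past_len s w start (by omega))
        obtain ⟨hge, hpre, hmin⟩ := PySem.Chars.findFrom_natCast_spec s w start hk h
        have hle := (pvFindFrom_ge s w start h).2
        set m := (PySem.Chars.findFrom s w (start : Int) none).toNat with hm
        have hmge : start ≤ m := by omega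
        have hmle : m ≤ s.length := by omega
        have hrec := ih (m + 1) (count + 1) (by omega)
        rw [hrec]
        have hocc : pvOcc s w start = pvOcc s w (m + 1) + 1 := by
          unfold pvOcc
          have hsplit : List.range' start (s.length + 1 - start)
              = List.range' start (m - start) ++ List.range' m (s.length + 1 - m) := by
            have := @List.range'_append start (m - start) (s.length + 1 - m) 1
            simp only [one_mul] at this
            rw [show start + (m - start) = m by omega] at this
            rw [show (m - start) + (s.length + 1 - m) = s.length + 1 - start by omega] at this
            exact this.symm
          rw [hsplit, List.countP_append]
          have h1 : List.countP (fun i => decide (w <+: List.drop i s))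
              (List.range' start (m - start)) = 0 := by
            apply List.countP_eq_zero.2
            intro i hi
            rw [List.mem_range'_1] at hi
            simp only [decide_eq_true_eq]
            exact hmin i hi.1 (by omega)
          have h2 : List.range' m (s.length + 1 - m) = m :: List.range' (m + 1) (s.length - m) := by
            rw [show s.length + 1 - m = (s.length - m) + 1 by omega]
            rw [List.range'_succ]
          rw [h1, h2, List.countP_cons]
          simp only [decide_eq_true_eq]
          rw [if_pos hpre]
          rw [show s.length + 1 - (m + 1) = s.length - m by omega]
          omega
        rw [hocc]
        push_cast
        ring
  intro start count
  exact main (s.length + 1 - start) start count le_rfl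

-- pvOcc from 0 equals the sliding-window count over range(len+1-|w|)
theorem pvOcc_zero_eq_window (s w : List Char) :
    pvOcc s w 0 =
      List.countP (fun i => decide (List.take w.length (List.drop i s) = w))
        (List.range (s.length + 1 - w.length)) := by
  unfold pvOcc
  rw [Nat.sub_zero, ← List.range_eq_range']
  have hcongr : List.countP (fun i => decide (w <+: List.drop i s)) (List.range (s.length + 1))
      = List.countP (fun i => decide (List.take w.length (List.drop i s) = w))
        (List.range (s.length + 1)) := by
    apply List.countP_congr
    intro i _
    simp only [decide_eq_true_eq, List.prefix_iff_eq_take]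
    exact ⟨fun h => h.symm, fun h => h.symm⟩
  rw [hcongr]
  by_cases hL : w.length ≤ s.length + 1
  · rw [show s.length + 1 = (s.length + 1 - w.length) + w.length by omega, List.range_add,
      List.countP_append]
    have hz : List.countP (fun i => decide (List.take w.length (List.drop i s) = w))
        ((List.range w.length).map (fun j => s.length + 1 - w.length + j)) = 0 := by
      apply List.countP_eq_zero.2
      intro i hi
      simp only [List.mem_map, List.mem_range] at hi
      obtain ⟨j, hj, rfl⟩ := hi
      simp only [decide_eq_true_eq]
      intro hEq
      have := congrArg List.length hEq
      simp only [List.length_take, List.length_drop] at this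
      omega
    rw [hz]
    simp only [Nat.add_zero, Nat.add_sub_cancel]
  · have h1 : s.length + 1 - w.length = 0 := by omega
    rw [h1]
    have hz : List.countP (fun i => decide (List.take w.length (List.drop i s) = w))
        (List.range (s.length + 1)) = 0 := by
      apply List.countP_eq_zero.2
      intro i hi
      simp only [List.mem_range] at hi
      simp only [decide_eq_true_eq]
      intro hEq
      have := congrArg List.length hEq
      simp only [List.length_take, List.length_drop] at this
      omega
    rw [hz]
    rfl

-- the two-indicator fold is the sum of two countP's
theorem pvCount_fold (p q : Nat → Prop) [DecidablePred p] [DecidablePred q] :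
    ∀ (l : List Nat) (c : Int),
      l.foldl (fun c i =>
        if q i then (if p i then c + 1 else c) + 1 else (if p i then c + 1 else c)) c
      = c + (List.countP (fun i => decide (p i)) l : Int)
          + (List.countP (fun i => decide (q i)) l : Int) := by
  intro l
  induction l with
  | nil => intro c; simp
  | cons a l ih =>
    intro c
    simp only [List.foldl_cons, ih, List.countP_cons, decide_eq_true_eq]
    split_ifs <;> push_cast <;> omega

-- B's inner fold is the sum of the two window counts
theorem pvInner_eq (s w rw : List Char) : ∀ count : Int,
    (PySem.List.pyRange 0 ((s.length : Int) - (w.length : Int) + 1)).foldl (fun c i =>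
      let chunk := PySem.List.slice s (some i) (some (i + (w.length : Int)))
      let c := if chunk = w then c + 1 else c
      if chunk = rw then c + 1 else c) count
    = count
      + (List.countP (fun i => decide (List.take w.length (List.drop i s) = w))
          (List.range (s.length + 1 - w.length)) : Int)
      + (List.countP (fun i => decide (List.take w.length (List.drop i s) = rw))
          (List.range (s.length + 1 - w.length)) : Int) := by
  intro count
  by_cases h : w.length ≤ s.length + 1
  · have hb : (s.length : Int) - (w.length : Int) + 1
        = ((s.length + 1 - w.length : Nat) : Int) := by omega
    rw [hb, PySem.List.pyRange_zero_natCast, List.foldl_map]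
    simp only [PySem.List.slice_natCast_add]
    exact pvCount_fold _ _ _ count
  · have h1 : s.length + 1 - w.length = 0 := by omega
    have h2 : PySem.List.pyRange 0 ((s.length : Int) - (w.length : Int) + 1) = [] := by
      apply List.eq_nil_iff_forall_not_mem.2
      intro x hx
      rw [PySem.List.mem_pyRange_one] at hx
      omega
    rw [h1, h2]
    simp

-- two folds over the same list with pointwise-equal step functions agree
theorem pvFoldl_ext {α β : Type} (f g : β → α → β) (h : ∀ c d, f c d = g c d) :
    ∀ (l : List α) (c : β), l.foldl f c = l.foldl g c := by
  intro l
  induction l with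
  | nil => intro c; rfl
  | cons d ds ih => intro c; simp only [List.foldl_cons, h, ih]

-- ===== VERDICT (by name: the statement is the Claim_ definition above) =====
theorem search_word_in_diagonals_spec : Claim_equal_search_word_in_diagonals := by
  intro diagonals word _
  unfold Spec_search_word_in_diagonals search_word_in_diagonals search_word_in_diagonals_alt
  apply pvFoldl_ext
  intro c d
  simp only [PySem.List.slice?_none_none_neg_one, Option.getD_some]
  rw [pvInner_eq, pvFindLoop_eq_occ, pvFindLoop_eq_occ,
    pvOcc_zero_eq_window, pvOcc_zero_eq_window]
  have hlen : word.toList.reverse.length = word.toList.length := by simp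
  rw [hlen]
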